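-- pv_equiv track=rewrite | github.com/khicken/CSDS310 | Presentation/kaleb-2.py | starmaxxing
-- ===== SOURCE A (Python) =====
-- def starmaxxing(S) -> int:
--     n = len(S)
--
--     cur_sum = 0    # cs, current (weighted) sum
--     pc_e0 = 0      # number of subarrays w/ sums = 0, for prev (p) iteration
--     pc_g0 = 0      # number of subarrays w/ sums > 0, for prev (p) iteration
--     c = 0          # total subarrays w/ sums > 0
--
--     sum_freq = [0] * (2*n + 1)    # sf, frequency array of weighted sums (-n <= weighted sum <= n)
--     sum_freq[n] += 1              # we have a sum of 0 already
--
--     for s in S: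
--         # if s is a star
--         if s:
--             cur_sum += 1
--             # number of subarrays w/ sums > 0, for current iteration
--             cc_g0 =       1  + pc_e0                             + pc_g0
--             #            [1] + subarrays w/ sum=0 now have sum=1 + all subarrays w/ sum>0 are still sum>0
--
--         # if s isn't a star
--         else:
--             cur_sum -= 1
--             # number of subarrays w/ sums > 0, for current iteration
--             cc_g0 =      pc_g0                              - sum_freq[cur_sum + n]
--             #            keep subarrays w/ sum>0 -> sum>=0  - # of subarrays w/ sum now drops to 0
--
--         # update variables for next iteration
--         pc_e0 = sum_freq[cur_sum + n]   # CRITICAL SECTION: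
--                                            # of weighted sums encountered so far = # of subarrays that will drop to 0 at the given weighted sum
--         pc_g0 = cc_g0                   # trivial
--         sum_freq[cur_sum + n] += 1      # update # of sums encountered, tells us
--
--         # add the number of subarrays w/ sum>0 at this iteration, for subarray A[0...i]
--         c += cc_g0
--     return c
-- ===== SOURCE B (Python) =====
-- def starmaxxing(S) -> int:
--     # prefix sums: +1 for a truthy element, -1 otherwise
--     P = [0]
--     acc = 0
--     for s in S:
--         acc += 1 if s else -1
--         P.append(acc)
--     # count pairs i < j with P[i] < P[j]
--     total = 0
--     rest = P
--     while rest: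
--         head, rest = rest[0], rest[1:]
--         total += sum(1 for y in rest if head < y)
--     return total
-- ===== Notes on version B (the rewrite author's own statement) =====
-- stated objective: simpler
-- what changed: Replaces A's incremental frequency-array recurrence (running counts of zero/positive-sum subarrays) with an explicit prefix-sum list and a direct quadratic count of pairs i<j with P[i]<P[j].
import Mathlib
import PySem

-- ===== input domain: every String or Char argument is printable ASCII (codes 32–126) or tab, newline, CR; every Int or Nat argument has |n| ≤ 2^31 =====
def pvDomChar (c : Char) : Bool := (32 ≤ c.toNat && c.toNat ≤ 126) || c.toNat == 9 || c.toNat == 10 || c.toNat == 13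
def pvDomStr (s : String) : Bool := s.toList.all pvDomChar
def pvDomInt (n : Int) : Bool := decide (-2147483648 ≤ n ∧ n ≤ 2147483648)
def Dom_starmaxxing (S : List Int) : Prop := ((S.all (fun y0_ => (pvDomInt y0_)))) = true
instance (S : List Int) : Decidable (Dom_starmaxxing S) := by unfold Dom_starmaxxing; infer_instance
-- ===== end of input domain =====

-- B replaces A's one-pass frequency-array recurrence by an explicit prefix-sum list and a
-- direct quadratic count of pairs i<j with P[i]<P[j]; simpler, not faster.

-- ===== PORT A =====
-- loop state: cur_sum, pc_e0, pc_g0, c, sum_freq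
structure StA where
  cur : Int
  pe : Int
  pg : Int
  c : Int
  sf : List Int
deriving Repr

-- one iteration of A's for-loop (n = len(S)); sum_freq indices are always in range,
-- so pyGetD/pySetD (total forms of xs[i] read/write) are exact here
def stepA (n : Nat) (st : StA) (s : Int) : StA :=
  if s ≠ 0 then
    let cur := st.cur + 1
    let cc := 1 + st.pe + st.pg
    let pe := PySem.List.pyGetD st.sf (cur + n) 0
    let sf := PySem.List.pySetD st.sf (cur + n) (PySem.List.pyGetD st.sf (cur + n) 0 + 1)
    ⟨cur, pe, cc, st.c + cc, sf⟩
  else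
    let cur := st.cur - 1
    let cc := st.pg - PySem.List.pyGetD st.sf (cur + n) 0
    let pe := PySem.List.pyGetD st.sf (cur + n) 0
    let sf := PySem.List.pySetD st.sf (cur + n) (PySem.List.pyGetD st.sf (cur + n) 0 + 1)
    ⟨cur, pe, cc, st.c + cc, sf⟩

def starmaxxing (S : List Int) : Int :=
  let n := S.length
  let base : List Int := List.replicate (2*n+1) 0
  let sf0 := PySem.List.pySetD base (n : Int) (PySem.List.pyGetD base (n : Int) 0 + 1)
  (S.foldl (stepA n) ⟨0, 0, 0, 0, sf0⟩).c

-- ===== PORT B =====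
-- B's while-loop over successive tails of P; 'sum(1 for y in rest if head < y)' is countP
def pairsFrom : List Int → Int
  | [] => 0
  | x :: xs => ((xs.countP (fun y => decide (x < y)) : Nat) : Int) + pairsFrom xs

def starmaxxing_alt (S : List Int) : Int :=
  let P := (S.foldl (fun (st : List Int × Int) s =>
      let acc := st.2 + (if s ≠ 0 then 1 else -1)
      (st.1 ++ [acc], acc)) ([0], 0)).1
  pairsFrom P

-- ===== PRECONDITION & SPEC =====
def Spec_starmaxxing (S : List Int) (out : Int) : Prop := out = starmaxxing_alt S
instance (S : List Int) (out : Int) : Decidable (Spec_starmaxxing S out) := by unfold Spec_starmaxxing; infer_instance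

-- ===== CLAIM (what is proved, stated in full; the proofs are below) =====
def Claim_equal_starmaxxing : Prop := ∀ (S : List Int), Dom_starmaxxing S → Spec_starmaxxing S (starmaxxing S)

-- ===== LEMMAS AND PROOFS =====

-- the prefix sums strictly after the start, beginning from accumulator a
def tailP (a : Int) : List Int → List Int
  | [] => []
  | s :: t => (a + (if s ≠ 0 then 1 else -1)) :: tailP (a + (if s ≠ 0 then 1 else -1)) t

lemma foldB (S : List Int) : ∀ (L : List Int) (a : Int),
    (S.foldl (fun (st : List Int × Int) s =>
      let acc := st.2 + (if s ≠ 0 then 1 else -1)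
      (st.1 ++ [acc], acc)) (L, a)).1 = L ++ tailP a S := by
  induction S with
  | nil => intro L a; simp [tailP]
  | cons s t ih =>
      intro L a
      simp only [List.foldl_cons, tailP]
      rw [ih]
      simp

lemma countP_lt_succ (L : List Int) (c : Int) :
    L.countP (fun y => decide (y < c + 1)) = L.countP (fun y => decide (y < c)) + L.count c := by
  induction L with
  | nil => simp
  | cons x t ih =>
      simp only [List.countP_cons, List.count_cons, ih]
      by_cases h1 : x < c + 1 <;> by_cases h2 : x < c <;> by_cases h3 : x = c <;>
        simp [h1, h2, h3] <;> omega

lemma pairsFrom_append (Q : List Int) (x : Int) :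
    pairsFrom (Q ++ [x]) = pairsFrom Q + (Q.countP (fun y => decide (y < x)) : Nat) := by
  induction Q with
  | nil => simp [pairsFrom]
  | cons q t ih =>
      simp only [List.cons_append, pairsFrom, ih, List.countP_append, List.countP_cons]
      push_cast
      by_cases h : q < x <;> simp [h] <;> ring

lemma getD_setD (xs : List Int) (i j v d : Int) (hi : 0 ≤ i)
    (hj : 0 ≤ j) (hjlen : j < xs.length) :
    PySem.List.pyGetD (PySem.List.pySetD xs i v) j d = if j = i then v else PySem.List.pyGetD xs j d := by
  rw [PySem.List.pySetD_of_nonneg xs v hi,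
      PySem.List.pyGetD_eq_getElem (xs.set i.toNat v) d hj (by simpa using hjlen),
      List.getElem_set]
  by_cases h : j = i
  · rw [if_pos (by omega : i.toNat = j.toNat), if_pos h]
  · rw [if_neg (by omega : ¬ i.toNat = j.toNat), if_neg h,
        PySem.List.pyGetD_eq_getElem xs d hj hjlen]

-- A's loop invariant: D = earlier prefix sums, cur = current prefix sum
def InvA (n : Nat) (D : List Int) (cur : Int) (st : StA) : Prop :=
  st.cur = cur ∧
  st.pe = (D.count cur : Nat) ∧
  st.pg = (D.countP (fun y => decide (y < cur)) : Nat) ∧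
  st.c = pairsFrom (D ++ [cur]) ∧
  st.sf.length = 2*n+1 ∧
  (∀ k : Int, -(n:Int) ≤ k → k ≤ n → PySem.List.pyGetD st.sf (k + n) 0 = ((D ++ [cur]).count k : Nat))

lemma step_inv (n : Nat) (D : List Int) (cur s : Int) (st : StA)
    (h : InvA n D cur st)
    (hb : cur.natAbs ≤ D.length) (hlt : D.length < n) :
    InvA n (D ++ [cur]) (cur + (if s ≠ 0 then 1 else -1)) (stepA n st s) := by
  obtain ⟨hc, hpe, hpg, hcc, hlen, hsf⟩ := h
  have hD : (D.length : Int) < n := by exact_mod_cast hlt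
  have hbnd : -(n:Int) < cur ∧ cur < n := by omega
  by_cases hs : s ≠ 0
  · -- star step: cur' = cur + 1
    have hread : PySem.List.pyGetD st.sf (cur + 1 + (n:Int)) 0 = (((D ++ [cur]).count (cur+1) : Nat) : Int) := by
      have := hsf (cur + 1) (by omega) (by omega); simpa using this
    have hcnt : ((D ++ [cur]).countP (fun y => decide (y < cur + 1)) : Int)
        = 1 + ((D.count cur : Nat) : Int) + ((D.countP (fun y => decide (y < cur)) : Nat) : Int) := by
      have h1 := countP_lt_succ D cur
      simp only [List.countP_append, List.countP_cons, List.countP_nil]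
      push_cast
      simp only [h1]
      push_cast
      have hd : decide (cur < cur + 1) = true := by simp
      rw [hd]
      simp only [if_true]
      push_cast
      ring
    refine ⟨?_, ?_, ?_, ?_, ?_, ?_⟩
    · simp [stepA, hs, hc]
    · simp only [stepA, if_pos hs, hc]
      exact hread
    · simp only [stepA, if_pos hs, hc]
      rw [hpe, hpg, hcnt]
    · simp only [stepA, if_pos hs, hc]
      rw [pairsFrom_append, hcc, hcnt, hpe, hpg]
    · simp only [stepA, if_pos hs]
      rw [PySem.List.length_pySetD]
      exact hlen
    · simp only [stepA, if_pos hs, hc]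
      intro k hk1 hk2
      have hjlen : k + (n:Int) < (st.sf.length : Int) := by rw [hlen]; push_cast; omega
      rw [getD_setD st.sf _ _ _ _ (by omega) (by omega) hjlen]
      by_cases hkc : k = cur + 1
      · rw [if_pos (by omega), hkc, hread]
        have hcnt1 : ((D ++ [cur]) ++ [cur+1]).count (cur+1) = (D ++ [cur]).count (cur+1) + 1 := by
          rw [List.count_append]
          have h1 : ([cur+1].count (cur+1)) = 1 := by simp
          rw [h1]
        rw [hcnt1]
        push_cast
        ring
      · rw [if_neg (by omega), hsf k hk1 hk2]
        have hcnt2 : (((D ++ [cur]) ++ [cur+1]).count k) = ((D ++ [cur]).count k) := by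
          have : ([cur+1].count k) = 0 := by
            simp [List.count_singleton]
            omega
          rw [List.count_append, this]
          omega
        rw [hcnt2]
  · -- non-star step: cur' = cur - 1
    have hread : PySem.List.pyGetD st.sf (cur - 1 + (n:Int)) 0 = (((D ++ [cur]).count (cur-1) : Nat) : Int) := by
      have := hsf (cur - 1) (by omega) (by omega); simpa using this
    have hcnt : ((D ++ [cur]).countP (fun y => decide (y < cur - 1)) : Int)
        = ((D.countP (fun y => decide (y < cur)) : Nat) : Int)
          - (((D ++ [cur]).count (cur-1) : Nat) : Int) := by
      have h1 := countP_lt_succ D (cur - 1)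
      rw [sub_add_cancel] at h1
      simp only [List.countP_append, List.countP_cons, List.countP_nil,
        List.count_append, List.count_cons, List.count_nil]
      have h2 : decide (cur < cur - 1) = false := by simp
      have h3 : (cur == cur - 1) = false := by simp; omega
      rw [h2, h3]
      push_cast [h1]
      ring
    refine ⟨?_, ?_, ?_, ?_, ?_, ?_⟩
    · simp only [stepA, if_neg hs, hc]
      ring
    · simp only [stepA, if_neg hs, hc]
      simp only [← sub_eq_add_neg]
      exact hread
    · simp only [stepA, if_neg hs, hc]
      simp only [← sub_eq_add_neg]
      rw [hpg, hread]
      exact hcnt.symm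
    · simp only [stepA, if_neg hs, hc]
      simp only [← sub_eq_add_neg]
      rw [pairsFrom_append, hcc, hcnt, hpg, hread]
    · simp only [stepA, if_neg hs]
      rw [PySem.List.length_pySetD]
      exact hlen
    · simp only [stepA, if_neg hs, hc]
      simp only [← sub_eq_add_neg]
      intro k hk1 hk2
      have hjlen : k + (n:Int) < (st.sf.length : Int) := by rw [hlen]; push_cast; omega
      rw [getD_setD st.sf _ _ _ _ (by omega) (by omega) hjlen]
      by_cases hkc : k = cur - 1
      · rw [if_pos (by omega), hkc, hread]
        have hcnt1 : ((D ++ [cur]) ++ [cur-1]).count (cur-1) = (D ++ [cur]).count (cur-1) + 1 := by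
          rw [List.count_append]
          have h1 : ([cur-1].count (cur-1)) = 1 := by simp
          rw [h1]
        rw [hcnt1]
        push_cast
        ring
      · rw [if_neg (by omega), hsf k hk1 hk2]
        have hcnt2 : (((D ++ [cur]) ++ [cur-1]).count k) = ((D ++ [cur]).count k) := by
          have : ([cur-1].count k) = 0 := by
            simp [List.count_singleton]
            omega
          rw [List.count_append, this]
          omega
        rw [hcnt2]

lemma loop_inv (n : Nat) : ∀ (rest D : List Int) (cur : Int) (st : StA),
    InvA n D cur st →
    D.length + 1 + rest.length = n + 1 →
    (∀ x ∈ D ++ [cur], x.natAbs ≤ D.length) →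
    (rest.foldl (stepA n) st).c = pairsFrom ((D ++ [cur]) ++ tailP cur rest) := by
  intro rest
  induction rest with
  | nil =>
      intro D cur st h _ _
      simpa [tailP] using h.2.2.2.1
  | cons s t ih =>
      intro D cur st h hlen hb
      simp only [List.foldl_cons, tailP, List.length_cons] at *
      have hcur : cur.natAbs ≤ D.length := hb cur (by simp)
      have h' := step_inv n D cur s st h hcur (by omega)
      have := ih (D ++ [cur]) (cur + (if s ≠ 0 then 1 else -1)) (stepA n st s) h'
        (by simp only [List.length_append, List.length_cons, List.length_nil]; omega)
        (by
          intro x hx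
          simp only [List.mem_append, List.mem_singleton, List.length_append,
            List.length_singleton] at hx ⊢
          rcases hx with hx | hx
          · have := hb x (by simpa using hx)
            omega
          · subst hx
            by_cases hs : s ≠ 0 <;> simp [hs] <;> omega)
      rw [this]
      simp

lemma init_inv (n : Nat) :
    InvA n [] 0 ⟨0, 0, 0, 0,
      PySem.List.pySetD (List.replicate (2*n+1) (0:Int)) (n : Int)
        (PySem.List.pyGetD (List.replicate (2*n+1) (0:Int)) (n : Int) 0 + 1)⟩ := by
  refine ⟨rfl, by simp, by simp, by simp [pairsFrom], by rw [PySem.List.length_pySetD]; simp, ?_⟩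
  intro k hk1 hk2
  have hget : PySem.List.pyGetD (List.replicate (2*n+1) (0:Int)) (n : Int) 0 = 0 := by
    rw [PySem.List.pyGetD_eq_getElem (List.replicate (2*n+1) (0:Int)) 0 (by omega) (by simp; omega)]
    simp
  rw [getD_setD _ _ _ _ _ (by omega) (by omega) (by simp; omega), hget]
  by_cases h : k = 0
  · subst h; simp
  · rw [if_neg (by omega)]
    rw [PySem.List.pyGetD_eq_getElem (List.replicate (2*n+1) (0:Int)) 0 (by omega) (by simp; omega)]
    simp [List.count_singleton]
    omega

-- ===== VERDICT (by name: the statement is the Claim_ definition above) =====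
theorem starmaxxing_spec : Claim_equal_starmaxxing := by
  intro S _
  show starmaxxing S = starmaxxing_alt S
  have h1 : starmaxxing_alt S = pairsFrom ([0] ++ tailP 0 S) := by
    unfold starmaxxing_alt
    rw [foldB]
  have h2 := loop_inv S.length S [] 0 _ (init_inv S.length)
    (by simp; omega) (by simp)
  rw [h1]
  exact h2
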